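-- pv_equiv track=rewrite | github.com/0m41k/data | Train/temp.py | lan
-- ===== SOURCE A (Python) =====
-- def lan(l):
--     l = l.split(';')
--     for i in l:
--         if i == 'English':
--             a = 1
--         else:
--             a = 0
--     if a == 1:
--         return 1
--     else:
--         return 0
-- ===== SOURCE B (Python) =====
-- def lan(l):
--     parts = l.split(';')
--     return 1 if parts[-1] == 'English' else 0
-- ===== Notes on version B (the rewrite author's own statement) =====
-- stated objective: simpler
-- what changed: A's loop overwrites its flag on every field so only the last field matters; B drops the loop and checks the last split field directly with parts[-1].
import Mathlib
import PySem

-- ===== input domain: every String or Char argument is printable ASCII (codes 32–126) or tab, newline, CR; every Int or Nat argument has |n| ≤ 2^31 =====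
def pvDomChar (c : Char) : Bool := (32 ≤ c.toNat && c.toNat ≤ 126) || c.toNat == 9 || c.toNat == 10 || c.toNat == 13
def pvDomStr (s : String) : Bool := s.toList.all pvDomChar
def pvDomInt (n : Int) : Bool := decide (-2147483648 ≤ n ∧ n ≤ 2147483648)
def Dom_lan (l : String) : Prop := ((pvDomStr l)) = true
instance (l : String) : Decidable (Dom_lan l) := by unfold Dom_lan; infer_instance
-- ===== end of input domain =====

-- B replaces A's flag-overwriting loop over all fields by a direct check of the last split field (objective: simpler).

-- ===== PORT A =====
def lan (l : String) : Int :=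
  let parts := (PySem.Str.split? l ";").getD []
  -- the loop: a is overwritten each iteration (initial 0 is never observed: split is nonempty)
  let a := parts.foldl (fun _ i => if i == "English" then (1 : Int) else 0) 0
  if a == 1 then 1 else 0

-- ===== PORT B =====
def lan_alt (l : String) : Int :=
  let parts := (PySem.Str.split? l ";").getD []
  match PySem.List.pyGet? parts (-1) with
  | some x => if x == "English" then 1 else 0
  | none => 0

-- ===== PRECONDITION & SPEC =====
def Spec_lan (l : String) (out : Int) : Prop := out = lan_alt l
instance (l : String) (out : Int) : Decidable (Spec_lan l out) := by unfold Spec_lan; infer_instance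

-- ===== CLAIM (what is proved, stated in full; the proofs are below) =====
def Claim_equal_lan : Prop := ∀ (l : String), Dom_lan l → Spec_lan l (lan l)

-- ===== LEMMAS AND PROOFS =====

theorem lan_fold_last (xs : List String) (a : Int) :
    xs.foldl (fun _ i => if i == "English" then (1 : Int) else 0) a =
      match xs.getLast? with
      | some x => if x == "English" then (1 : Int) else 0
      | none => a := by
  induction xs generalizing a with
  | nil => rfl
  | cons x xs ih =>
    simp only [List.foldl_cons, ih]
    cases h : xs.getLast? with
    | some y => simp [List.getLast?_cons, h]
    | none =>
      have : xs = [] := List.getLast?_eq_none_iff.mp h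
      subst this; rfl

-- ===== VERDICT (by name: the statement is the Claim_ definition above) =====
theorem lan_spec : Claim_equal_lan := by
  intro l _
  unfold Spec_lan lan lan_alt
  simp only [lan_fold_last, PySem.List.pyGet?_neg_one]
  cases h : ((PySem.Str.split? l ";").getD []).getLast? with
  | some x => split <;> simp
  | none => rfl
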